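-- pv_equiv track=rewrite | github.com/shutinghe3601/milestone2 | src/nrc_emotion/lexicon_loader.py | find_emotion_matches
-- ===== SOURCE A (Python) =====
-- from typing import Dict, List, Set
--
-- def find_emotion_matches(
--     tokens: List[str], lexicon: Dict[str, Set[str]], emotions: List[str]
-- ) -> tuple[Dict[int, List[str]], Dict[str, List[str]], Set[str]]:
--     """
--     Find emotion matches for tokens in the lexicon.
--
--     Args:
--         tokens: List of processed tokens
--         lexicon: Dictionary mapping emotion -> set of words
--         emotions: List of emotions to check
--
--     Returns:
--         Tuple of:
--         - emotion_matches: Dict mapping token index -> list of matched emotions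
--         - word_emotions: Dict mapping word -> list of emotions (for debugging)
--         - matched_words: Set of words that matched any emotion
--     """
--     emotion_matches = {}
--     word_emotions = {}  # For debugging: word -> emotions
--     matched_words = set()  # For debugging: words that matched
--
--     for i, token in enumerate(tokens):
--         matched_emotions = []
--         for emotion in emotions:
--             if token in lexicon[emotion]:
--                 matched_emotions.append(emotion)
--                 matched_words.add(token)
--         if matched_emotions:
--             emotion_matches[i] = matched_emotions
--             word_emotions[token] = matched_emotions
--
--     return emotion_matches, word_emotions, matched_words
-- ===== SOURCE B (Python) =====
-- from typing import Dict, List, Set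
--
-- def find_emotion_matches(
--     tokens: List[str], lexicon: Dict[str, Set[str]], emotions: List[str]
-- ) -> tuple[Dict[int, List[str]], Dict[str, List[str]], Set[str]]:
--     """Inverted-index re-implementation: build word -> [emotions] once, then one lookup per token."""
--     if not tokens:
--         return {}, {}, set()
--     index: Dict[str, List[str]] = {}
--     for emotion in emotions:
--         for word in lexicon[emotion]:
--             index.setdefault(word, []).append(emotion)
--     emotion_matches = {}
--     word_emotions = {}
--     matched_words = set()
--     for i, token in enumerate(tokens):
--         matched = index.get(token, [])
--         if matched:
--             emotion_matches[i] = matched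
--             word_emotions[token] = matched
--             matched_words.add(token)
--     return emotion_matches, word_emotions, matched_words
-- ===== Notes on version B (the rewrite author's own statement) =====
-- stated objective: idiomatic
-- what changed: Replaces the per-token scan over all emotions with an inverted index (word -> list of emotions in emotions order) built once, then a single dict lookup per token; empty token lists return early.
import Mathlib
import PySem

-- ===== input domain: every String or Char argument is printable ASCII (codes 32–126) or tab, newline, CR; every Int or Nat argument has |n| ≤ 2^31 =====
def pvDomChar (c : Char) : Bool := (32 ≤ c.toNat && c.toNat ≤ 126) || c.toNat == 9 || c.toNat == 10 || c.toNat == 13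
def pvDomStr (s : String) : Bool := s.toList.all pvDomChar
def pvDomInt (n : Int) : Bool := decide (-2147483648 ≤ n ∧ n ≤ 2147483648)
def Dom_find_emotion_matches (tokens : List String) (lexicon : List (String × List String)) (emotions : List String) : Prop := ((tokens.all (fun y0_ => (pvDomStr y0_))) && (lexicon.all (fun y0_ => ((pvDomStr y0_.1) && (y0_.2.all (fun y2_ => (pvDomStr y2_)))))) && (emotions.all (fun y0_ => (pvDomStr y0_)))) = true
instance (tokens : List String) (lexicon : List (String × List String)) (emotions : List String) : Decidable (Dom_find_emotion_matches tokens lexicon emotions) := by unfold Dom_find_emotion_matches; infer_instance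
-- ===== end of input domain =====

-- B replaces A's per-token scan over all emotions by an inverted word->emotions index built once,
-- then one dict lookup per token (same return value; idiomatic restructuring, no speed claim).


-- ===== PORT A =====
-- the body of A's `for i, token in enumerate(tokens)` loop (state: emotion_matches, word_emotions, matched_words)
def pvAStep (lexicon : List (String × List String)) (emotions : List String)
    (st : PySem.Dict Int (List String) × PySem.Dict String (List String) × PySem.Set String)
    (p : Int × String) :
    PySem.Dict Int (List String) × PySem.Dict String (List String) × PySem.Set String :=
  -- inner loop: matched_emotions accumulates, matched_words is updated as A goes
  let inner := emotions.foldl (fun acc emotion =>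
      if ((PySem.Dict.mk lexicon).getD emotion []).contains p.2 then
        (acc.1 ++ [emotion], PySem.Set.add acc.2 p.2)
      else acc) (([] : List String), st.2.2)
  if inner.1 ≠ [] then (st.1.insert p.1 inner.1, st.2.1.insert p.2 inner.1, inner.2)
  else (st.1, st.2.1, inner.2)

def find_emotion_matches (tokens : List String) (lexicon : List (String × List String)) (emotions : List String) : (List (Int × List String)) × (List (String × List String)) × List String :=
  let st := (PySem.List.enumerate tokens).foldl (pvAStep lexicon emotions)
      (PySem.Dict.empty, PySem.Dict.empty, PySem.Set.empty)
  (st.1.items, st.2.1.items, st.2.2)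

-- ===== PORT B =====
-- inverted index: word -> list of emotions (emotions order), `index.setdefault(word, []).append(emotion)`
def pvIndex (lexicon : List (String × List String)) (emotions : List String) : PySem.Dict String (List String) :=
  emotions.foldl (fun idx emotion =>
    ((PySem.Dict.mk lexicon).getD emotion []).foldl
      (fun idx word => idx.modify word [] (fun l => l ++ [emotion])) idx)
    PySem.Dict.empty

-- the body of B's token loop: one index lookup per token
def pvBStep (index : PySem.Dict String (List String))
    (st : PySem.Dict Int (List String) × PySem.Dict String (List String) × PySem.Set String)
    (p : Int × String) :
    PySem.Dict Int (List String) × PySem.Dict String (List String) × PySem.Set String :=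
  let matched := index.getD p.2 []
  if matched ≠ [] then (st.1.insert p.1 matched, st.2.1.insert p.2 matched, PySem.Set.add st.2.2 p.2)
  else st

def find_emotion_matches_alt (tokens : List String) (lexicon : List (String × List String)) (emotions : List String) : (List (Int × List String)) × (List (String × List String)) × List String :=
  if tokens = [] then ([], [], [])
  else
    let st := (PySem.List.enumerate tokens).foldl (pvBStep (pvIndex lexicon emotions))
        (PySem.Dict.empty, PySem.Dict.empty, PySem.Set.empty)
    (st.1.items, st.2.1.items, st.2.2)

-- ===== PRECONDITION & SPEC =====
-- A raises KeyError when tokens is nonempty and some emotion is missing from lexicon (excluded by the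
-- first conjunct); the second conjunct only states that each lexicon value models a Python set, i.e.
-- holds distinct words (every Python input satisfies it).
def Pre_find_emotion_matches (tokens : List String) (lexicon : List (String × List String)) (emotions : List String) : Prop :=
  (tokens = [] ∨ ∀ e ∈ emotions, (PySem.Dict.mk lexicon).contains e = true) ∧
  ∀ p ∈ lexicon, p.2.Nodup
instance (tokens : List String) (lexicon : List (String × List String)) (emotions : List String) : Decidable (Pre_find_emotion_matches tokens lexicon emotions) := by unfold Pre_find_emotion_matches; infer_instance
def pvWitness_find_emotion_matches : List String × (List (String × List String)) × List String :=
  (["dog", "cat"], [("joy", ["dog"]), ("fear", ["cat", "dog"])], ["joy", "fear"])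

def Spec_find_emotion_matches (tokens : List String) (lexicon : List (String × List String)) (emotions : List String) (out : (List (Int × List String)) × (List (String × List String)) × List String) : Prop := out = find_emotion_matches_alt tokens lexicon emotions
instance (tokens : List String) (lexicon : List (String × List String)) (emotions : List String) (out : (List (Int × List String)) × (List (String × List String)) × List String) : Decidable (Spec_find_emotion_matches tokens lexicon emotions out) := by unfold Spec_find_emotion_matches; infer_instance

-- ===== CLAIM (what is proved, stated in full; the proofs are below) =====
def Claim_equal_find_emotion_matches : Prop := ∀ (tokens : List String) (lexicon : List (String × List String)) (emotions : List String), Dom_find_emotion_matches tokens lexicon emotions → Pre_find_emotion_matches tokens lexicon emotions → Spec_find_emotion_matches tokens lexicon emotions (find_emotion_matches tokens lexicon emotions)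

-- ===== LEMMAS AND PROOFS =====

lemma pvAdd_add (s : PySem.Set String) (x : String) :
    PySem.Set.add (PySem.Set.add s x) x = PySem.Set.add s x := by
  simp only [PySem.Set.add]
  split_ifs <;> simp_all

-- any value returned by a lookup in `lexicon` is one of its value lists (or the default [])
lemma pvGetD_nodup (lexicon : List (String × List String)) (h : ∀ p ∈ lexicon, p.2.Nodup)
    (e : String) : ((PySem.Dict.mk lexicon).getD e []).Nodup := by
  induction lexicon with
  | nil => simp [PySem.Dict.getD, PySem.Dict.get?]
  | cons p rest ih =>
    obtain ⟨k, v⟩ := p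
    have ih' := ih (fun q hq => h q (List.mem_cons_of_mem _ hq))
    simp only [PySem.Dict.getD, PySem.Dict.get?_mk_cons] at ih' ⊢
    split
    · simpa using h (k, v) List.mem_cons_self
    · exact ih'

-- A's inner loop over `emotions` computes the filter of emotions matching the token,
-- adding the token to matched_words iff that filter is nonempty
lemma pvInner_eq (lexicon : List (String × List String)) (emotions : List String)
    (token : String) (l : List String) (mw : PySem.Set String) :
    emotions.foldl (fun acc emotion =>
        if ((PySem.Dict.mk lexicon).getD emotion []).contains token then
          (acc.1 ++ [emotion], PySem.Set.add acc.2 token)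
        else acc) (l, mw)
    = (l ++ emotions.filter (fun e => ((PySem.Dict.mk lexicon).getD e []).contains token),
       if emotions.filter (fun e => ((PySem.Dict.mk lexicon).getD e []).contains token) = []
       then mw else PySem.Set.add mw token) := by
  induction emotions generalizing l mw with
  | nil => simp
  | cons e es ih =>
    simp only [List.foldl_cons, List.filter_cons]
    by_cases hc : ((PySem.Dict.mk lexicon).getD e []).contains token
    · simp only [hc, if_pos, ih, List.append_assoc, List.singleton_append, Prod.mk.injEq]
      refine ⟨trivial, ?_⟩
      rw [if_neg (List.cons_ne_nil _ _)]
      split_ifs with h1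
      · rfl
      · exact pvAdd_add mw token
    · simp only [hc]
      simpa using ih l mw

-- one row of the index build: folding one word list appends `e` exactly to the entries of its words
lemma pvRow (v : List String) (hv : v.Nodup) (e w : String) (idx : PySem.Dict String (List String)) :
    (v.foldl (fun idx word => idx.modify word [] (fun l => l ++ [e])) idx).getD w []
    = idx.getD w [] ++ (if v.contains w then [e] else []) := by
  induction v generalizing idx with
  | nil => simp
  | cons x xs ih =>
    have hx : x ∉ xs := (List.nodup_cons.mp hv).1
    simp only [List.foldl_cons]
    rw [ih (List.nodup_cons.mp hv).2]
    rw [PySem.Dict.getD_modify]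
    by_cases hwx : w = x
    · subst hwx
      simp [hx]
    · simp only [hwx, if_false]
      by_cases hm : w ∈ xs <;> simp [hm, hwx]

-- the index value at any word is exactly A's per-token filter of `emotions`
lemma pvIndexVal (lexicon : List (String × List String)) (hN : ∀ p ∈ lexicon, p.2.Nodup)
    (emotions : List String) (w : String) :
    (pvIndex lexicon emotions).getD w []
    = emotions.filter (fun e => ((PySem.Dict.mk lexicon).getD e []).contains w) := by
  unfold pvIndex
  suffices H : ∀ idx : PySem.Dict String (List String),
      (emotions.foldl (fun idx emotion =>
        ((PySem.Dict.mk lexicon).getD emotion []).foldl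
          (fun idx word => idx.modify word [] (fun l => l ++ [emotion])) idx) idx).getD w []
      = idx.getD w [] ++ emotions.filter (fun e => ((PySem.Dict.mk lexicon).getD e []).contains w) by
    simpa [PySem.Dict.getD, PySem.Dict.empty, PySem.Dict.get?] using H PySem.Dict.empty
  induction emotions with
  | nil => simp
  | cons e es ih =>
    intro idx
    simp only [List.foldl_cons, List.filter_cons]
    rw [ih, pvRow _ (pvGetD_nodup lexicon hN e) e w idx]
    by_cases hm : w ∈ (PySem.Dict.mk lexicon).getD e [] <;> simp [hm]

-- with the index precomputed, A's loop body and B's loop body are the same function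
lemma pvStep_eq (lexicon : List (String × List String)) (emotions : List String)
    (hN : ∀ p ∈ lexicon, p.2.Nodup)
    (st : PySem.Dict Int (List String) × PySem.Dict String (List String) × PySem.Set String)
    (p : Int × String) :
    pvAStep lexicon emotions st p = pvBStep (pvIndex lexicon emotions) st p := by
  unfold pvAStep pvBStep
  rw [pvInner_eq, pvIndexVal lexicon hN emotions p.2]
  by_cases hF : emotions.filter (fun e => ((PySem.Dict.mk lexicon).getD e []).contains p.2) = []
  · simp only [hF]
    simp
  · obtain ⟨x, hx⟩ := List.exists_mem_of_ne_nil _ hF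
    obtain ⟨hxe, hxc⟩ := List.mem_filter.mp hx
    have hex : ∃ a ∈ emotions, p.2 ∈ (PySem.Dict.mk lexicon).getD a [] := ⟨x, hxe, by simpa using hxc⟩
    have hall : ¬ ∀ a ∈ emotions, p.2 ∉ (PySem.Dict.mk lexicon).getD a [] := by
      push Not
      exact hex
    simp [hall]

-- ===== VERDICT (by name: the statement is the Claim_ definition above) =====
theorem find_emotion_matches_spec : Claim_equal_find_emotion_matches := by
  intro tokens lexicon emotions _ hPre
  unfold Spec_find_emotion_matches find_emotion_matches find_emotion_matches_alt
  rcases tokens with _ | ⟨t, ts⟩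
  · rfl
  · rw [if_neg (by simp)]
    have : pvAStep lexicon emotions = pvBStep (pvIndex lexicon emotions) :=
      funext fun st => funext fun p => pvStep_eq lexicon emotions hPre.2 st p
    rw [this]
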